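-- pv_equiv track=rewrite | github.com/tekitounix/ai-ops | ai_ops/lifecycle/migration.py | _classify_stack
-- ===== SOURCE A (Python) =====
-- _STACK_HINT_MARKERS: tuple[tuple[str, tuple[str, ...]], ...] = (
--     # (stack_hint, marker filenames)
--     ("xmake", ("xmake.lua",)),
--     ("cmake", ("CMakeLists.txt",)),
--     ("node", ("package.json", "pnpm-lock.yaml", "bun.lockb")),
--     ("python", ("pyproject.toml", "uv.lock", "requirements.txt", "Pipfile")),
--     ("rust", ("Cargo.toml",)),
--     ("go", ("go.mod",)),
--     ("dsl", (".ato",)),  # atopile etc — extension match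
-- )
--
-- def _classify_stack(top_names: list[str]) -> str:
--     """Return stack_hint from top-level file names."""
--     lower = {name.lower() for name in top_names}
--     for hint, markers in _STACK_HINT_MARKERS:
--         for marker in markers:
--             if marker.startswith("."):
--                 # extension match
--                 if any(name.endswith(marker) for name in lower):
--                     return hint
--             elif marker in lower:
--                 return hint
--     return "unknown"
-- ===== SOURCE B (Python) =====
-- _MARKER_INDEX = {
--     "xmake.lua": (0, "xmake"),
--     "cmakelists.txt": (1, "cmake"),
--     "package.json": (2, "node"),
--     "pnpm-lock.yaml": (2, "node"),
--     "bun.lockb": (2, "node"),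
--     "pyproject.toml": (3, "python"),
--     "uv.lock": (3, "python"),
--     "requirements.txt": (3, "python"),
--     "pipfile": (3, "python"),
--     "cargo.toml": (4, "rust"),
--     "go.mod": (5, "go"),
-- }
--
--
-- def _classify_stack(top_names: list[str]) -> str:
--     """Return stack_hint from top-level file names (single pass, min table index wins)."""
--     best = (7, "unknown")
--     for name in top_names:
--         n = name.lower()
--         hit = _MARKER_INDEX.get(n)
--         if hit is not None and hit[0] < best[0]:
--             best = hit
--         if n.endswith(".ato") and 6 < best[0]:
--             best = (6, "dsl")
--     return best[1]
-- ===== Notes on version B (the rewrite author's own statement) =====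
-- stated objective: alternative
-- what changed: Instead of scanning the marker table against a set of lowercased names, B makes one pass over the names with a precomputed marker->(priority index, hint) dict, keeping the minimum table index; it also fixes A's dead mixed-case markers (CMakeLists.txt, Pipfile, Cargo.toml), which A lowercase-normalizes away so they can never match.
-- intended difference: On inputs that case-insensitively contain CMakeLists.txt, Pipfile or Cargo.toml without a higher-priority marker masking them, A returns a later table hint or the string unknown, because its lowercased name set can never equal those mixed-case marker strings, while B returns the table's intended hint for that marker; B's value is what the marker table plainly intends. — e.g. on _classify_stack(["CMakeLists.txt", "go.mod"]): A returns "go", B returns "cmake"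
import Mathlib
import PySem

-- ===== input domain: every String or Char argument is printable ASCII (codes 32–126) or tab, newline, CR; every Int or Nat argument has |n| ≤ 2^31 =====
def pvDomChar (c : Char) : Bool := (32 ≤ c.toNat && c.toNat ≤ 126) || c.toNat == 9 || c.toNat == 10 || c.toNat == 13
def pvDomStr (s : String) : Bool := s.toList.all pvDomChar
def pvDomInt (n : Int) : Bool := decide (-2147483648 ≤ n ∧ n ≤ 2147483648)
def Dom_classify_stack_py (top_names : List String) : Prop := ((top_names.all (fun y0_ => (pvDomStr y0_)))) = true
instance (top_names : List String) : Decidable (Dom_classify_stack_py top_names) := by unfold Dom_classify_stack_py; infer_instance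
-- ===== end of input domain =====

set_option maxHeartbeats 1600000

-- B replaces A's marker-table scan by one pass over the names with a precomputed
-- marker→(index,hint) dict, keeping the minimum table index; it also fixes A's dead
-- mixed-case markers (objective: alternative; intended difference stated in D_ below).

-- ===== PORT A =====
def aMarkers : List (String × List String) :=
  [("xmake", ["xmake.lua"]),
   ("cmake", ["CMakeLists.txt"]),
   ("node", ["package.json", "pnpm-lock.yaml", "bun.lockb"]),
   ("python", ["pyproject.toml", "uv.lock", "requirements.txt", "Pipfile"]),
   ("rust", ["Cargo.toml"]),
   ("go", ["go.mod"]),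
   ("dsl", [".ato"])]

-- inner 'for marker in markers' loop; 'some hint' = the early return
def aScanMarkers (lower : PySem.Set String) (hint : String) : List String → Option String
  | [] => none
  | m :: ms =>
    if PySem.Str.startswith m "." then
      if List.any lower (fun name => PySem.Str.endswith name m) then some hint
      else aScanMarkers lower hint ms
    else if PySem.Set.contains lower m then some hint
    else aScanMarkers lower hint ms

-- outer 'for hint, markers in _STACK_HINT_MARKERS' loop
def aLoop (lower : PySem.Set String) : List (String × List String) → String
  | [] => "unknown"
  | (hint, markers) :: rest =>
    match aScanMarkers lower hint markers with
    | some h => h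
    | none => aLoop lower rest

def classify_stack_py (top_names : List String) : String :=
  let lower : PySem.Set String := PySem.Set.ofList (top_names.map PySem.Str.lower)
  aLoop lower aMarkers

-- ===== PORT B =====
def bExact : PySem.Dict String (Int × String) :=
  ⟨[("xmake.lua", (0, "xmake")),
    ("cmakelists.txt", (1, "cmake")),
    ("package.json", (2, "node")),
    ("pnpm-lock.yaml", (2, "node")),
    ("bun.lockb", (2, "node")),
    ("pyproject.toml", (3, "python")),
    ("uv.lock", (3, "python")),
    ("requirements.txt", (3, "python")),
    ("pipfile", (3, "python")),
    ("cargo.toml", (4, "rust")),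
    ("go.mod", (5, "go"))]⟩

-- one iteration of Source B's 'for name in top_names' loop
def bStep (best : Int × String) (name : String) : Int × String :=
  let n := PySem.Str.lower name
  let best1 :=
    match PySem.Dict.get? bExact n with
    | some hit => if hit.1 < best.1 then hit else best
    | none => best
  if PySem.Str.endswith n ".ato" && decide ((6 : Int) < best1.1) then ((6 : Int), "dsl") else best1

def classify_stack_py_alt (top_names : List String) : String :=
  (top_names.foldl bStep ((7 : Int), "unknown")).2

-- ===== PRECONDITION & SPEC =====
-- On inputs that case-insensitively contain CMakeLists.txt, Pipfile or Cargo.toml without a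
-- higher-priority marker masking them, A returns a later table hint or the string unknown,
-- because its lowercased name set can never equal those mixed-case marker strings, while B
-- returns the table's intended hint for that marker.
def D_classify_stack_py (top_names : List String) : Prop :=
  let L := top_names.map PySem.Str.lower
  "xmake.lua" ∉ L ∧
    ("cmakelists.txt" ∈ L ∨
      ((∀ m ∈ (["package.json", "pnpm-lock.yaml", "bun.lockb",
                 "pyproject.toml", "uv.lock", "requirements.txt"] : List String), m ∉ L) ∧
        ("pipfile" ∈ L ∨ "cargo.toml" ∈ L)))
instance (top_names : List String) : Decidable (D_classify_stack_py top_names) := by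
  unfold D_classify_stack_py; infer_instance

def Spec_classify_stack_py (top_names : List String) (out : String) : Prop :=
  ¬ D_classify_stack_py top_names → out = classify_stack_py_alt top_names
instance (top_names : List String) (out : String) : Decidable (Spec_classify_stack_py top_names out) := by
  unfold Spec_classify_stack_py; infer_instance

def pvDiffWitness_classify_stack_py : List String := (["CMakeLists.txt", "go.mod"])
def pvDiffWitnessOut_classify_stack_py : String × String := ("go", "cmake")

-- ===== CLAIM (what is proved, stated in full; the proofs are below) =====
def Claim_unchanged_classify_stack_py : Prop := ∀ (top_names : List String), Dom_classify_stack_py top_names → Spec_classify_stack_py top_names (classify_stack_py top_names)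
def Claim_changed_classify_stack_py : Prop := Dom_classify_stack_py (pvDiffWitness_classify_stack_py) ∧ D_classify_stack_py (pvDiffWitness_classify_stack_py) ∧ classify_stack_py (pvDiffWitness_classify_stack_py) = pvDiffWitnessOut_classify_stack_py.1 ∧ classify_stack_py_alt (pvDiffWitness_classify_stack_py) = pvDiffWitnessOut_classify_stack_py.2 ∧ pvDiffWitnessOut_classify_stack_py.1 ≠ pvDiffWitnessOut_classify_stack_py.2
def Claim_exact_classify_stack_py : Prop := ∀ (top_names : List String), Dom_classify_stack_py top_names → D_classify_stack_py top_names → classify_stack_py top_names ≠ classify_stack_py_alt top_names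

-- ===== LEMMAS AND PROOFS =====

-- 'some name lowercases to m'
def ql (names : List String) (m : String) : Bool :=
  names.any (fun x => PySem.Str.lower x == m)

def qext (names : List String) : Bool :=
  names.any (fun x => PySem.Str.endswith (PySem.Str.lower x) ".ato")

theorem ql_mem (names : List String) (m : String) :
    m ∈ names.map PySem.Str.lower ↔ ql names m = true := by
  simp [ql, List.any_eq_true, List.mem_map, beq_iff_eq]

theorem not_mem_ql (names : List String) (m : String)
    (h : m ∉ names.map PySem.Str.lower) : ql names m = false := by
  rcases hq : ql names m with _ | _
  · rfl
  · exact absurd ((ql_mem names m).mpr hq) h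

-- lowering is idempotent (char level)
theorem charle (a b : Char) : a ≤ b ↔ a.toNat ≤ b.toNat := by
  rw [Char.le_def, UInt32.le_iff_toNat_le]; rfl

theorem lowerChar_idem (c : Char) : PySem.Chars.lowerChar (PySem.Chars.lowerChar c) = PySem.Chars.lowerChar c := by
  unfold PySem.Chars.lowerChar PySem.Chars.isupper
  split_ifs with h1 h2
  · exfalso
    rcases Bool.and_eq_true .. |>.mp h1 with ⟨ha, hb⟩
    rcases Bool.and_eq_true .. |>.mp h2 with ⟨hc, hd⟩
    have ha2 : 65 ≤ c.toNat := by simpa [charle] using of_decide_eq_true ha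
    have hb2 : c.toNat ≤ 90 := by simpa [charle] using of_decide_eq_true hb
    have hd' := of_decide_eq_true hd
    rw [charle] at hd'
    have hv : (c.toNat + 32).isValidChar := Or.inl (by omega)
    have ht : (Char.ofNat (c.toNat + 32)).toNat = c.toNat + 32 := by
      rw [Char.toNat_ofNat]; simp [hv]
    rw [ht] at hd'
    have : ('Z').toNat = 90 := by decide
    omega
  · rfl
  · rfl

theorem lower_idem (s : String) : PySem.Str.lower (PySem.Str.lower s) = PySem.Str.lower s := by
  unfold PySem.Str.lower
  simp [PySem.Chars.lower, Function.comp_def, lowerChar_idem]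

theorem ql_dead (names : List String) (m : String) (h : PySem.Str.lower m ≠ m) :
    ql names m = false := by
  rw [ql, List.any_eq_false]
  intro x _ hbeq
  have he : PySem.Str.lower x = m := by simpa using hbeq
  apply h
  calc PySem.Str.lower m = PySem.Str.lower (PySem.Str.lower x) := by rw [he]
    _ = PySem.Str.lower x := lower_idem x
    _ = m := he

-- set membership over the lowered names = ql
theorem set_contains_eq (names : List String) (m : String) :
    PySem.Set.contains (PySem.Set.ofList (names.map PySem.Str.lower)) m = ql names m := by
  rw [ql, Bool.eq_iff_iff]
  simp only [PySem.Set.contains, List.contains_iff_exists_mem_beq, List.any_eq_true, beq_iff_eq]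
  constructor
  · rintro ⟨y, hy, rfl⟩
    rcases List.mem_map.mp ((PySem.Set.mem_ofList _ _).mp hy) with ⟨x, hx, hxe⟩
    exact ⟨x, hx, hxe⟩
  · rintro ⟨x, hx, hxe⟩
    exact ⟨PySem.Str.lower x, (PySem.Set.mem_ofList _ _).mpr (List.mem_map.mpr ⟨x, hx, rfl⟩), hxe.symm⟩

theorem set_any_eq (names : List String) (p : String → Bool) :
    List.any (PySem.Set.ofList (names.map PySem.Str.lower)) p = names.any (fun x => p (PySem.Str.lower x)) := by
  rw [Bool.eq_iff_iff]
  simp only [List.any_eq_true]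
  constructor
  · rintro ⟨y, hy, hp⟩
    rcases List.mem_map.mp ((PySem.Set.mem_ofList _ _).mp hy) with ⟨x, hx, rfl⟩
    exact ⟨x, hx, hp⟩
  · rintro ⟨x, hx, hp⟩
    exact ⟨PySem.Str.lower x, (PySem.Set.mem_ofList _ _).mpr (List.mem_map.mpr ⟨x, hx, rfl⟩), hp⟩

-- stepping A's loops one marker at a time
theorem scan_cons (lower : PySem.Set String) (hint m : String) (ms : List String) :
    aScanMarkers lower hint (m :: ms)
      = if (if PySem.Str.startswith m "." then List.any lower (fun name => PySem.Str.endswith name m)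
            else PySem.Set.contains lower m) then some hint
        else aScanMarkers lower hint ms := by
  simp only [aScanMarkers]
  split_ifs <;> rfl

theorem aLoop_cons (lower : PySem.Set String) (hint : String) (markers : List String)
    (rest : List (String × List String)) :
    aLoop lower ((hint, markers) :: rest)
      = match aScanMarkers lower hint markers with
        | some h => h
        | none => aLoop lower rest := by
  simp only [aLoop]

theorem aLoop_nilM (lower : PySem.Set String) (hint : String) (rest : List (String × List String)) :
    aLoop lower ((hint, []) :: rest) = aLoop lower rest := by
  rw [aLoop_cons]
  rfl

theorem aLoop_consM (lower : PySem.Set String) (hint m : String) (ms : List String)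
    (rest : List (String × List String)) :
    aLoop lower ((hint, m :: ms) :: rest)
      = if (if PySem.Str.startswith m "." then List.any lower (fun name => PySem.Str.endswith name m)
            else PySem.Set.contains lower m) then hint
        else aLoop lower ((hint, ms) :: rest) := by
  rw [aLoop_cons, scan_cons]
  by_cases h : (if PySem.Str.startswith m "." then List.any lower (fun name => PySem.Str.endswith name m)
      else PySem.Set.contains lower m) = true
  · rw [if_pos h, if_pos h]
  · rw [if_neg h, if_neg h, aLoop_cons]

-- A as a chain of membership tests (its dead mixed-case markers removed)
theorem A_eq (names : List String) : classify_stack_py names =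
    if ql names "xmake.lua" then "xmake"
    else if ql names "package.json" then "node"
    else if ql names "pnpm-lock.yaml" then "node"
    else if ql names "bun.lockb" then "node"
    else if ql names "pyproject.toml" then "python"
    else if ql names "uv.lock" then "python"
    else if ql names "requirements.txt" then "python"
    else if ql names "go.mod" then "go"
    else if qext names then "dsl"
    else "unknown" := by
  have d1 : ql names "CMakeLists.txt" = false := ql_dead names _ (by decide)
  have d2 : ql names "Pipfile" = false := ql_dead names _ (by decide)
  have d3 : ql names "Cargo.toml" = false := ql_dead names _ (by decide)
  show aLoop _ aMarkers = _
  rw [aMarkers]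
  simp only [aLoop_consM, aLoop_nilM, set_contains_eq, set_any_eq]
  have s1 : PySem.Str.startswith "xmake.lua" "." = false := by decide
  have s2 : PySem.Str.startswith "CMakeLists.txt" "." = false := by decide
  have s3 : PySem.Str.startswith "package.json" "." = false := by decide
  have s4 : PySem.Str.startswith "pnpm-lock.yaml" "." = false := by decide
  have s5 : PySem.Str.startswith "bun.lockb" "." = false := by decide
  have s6 : PySem.Str.startswith "pyproject.toml" "." = false := by decide
  have s7 : PySem.Str.startswith "uv.lock" "." = false := by decide
  have s8 : PySem.Str.startswith "requirements.txt" "." = false := by decide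
  have s9 : PySem.Str.startswith "Pipfile" "." = false := by decide
  have s10 : PySem.Str.startswith "Cargo.toml" "." = false := by decide
  have s11 : PySem.Str.startswith "go.mod" "." = false := by decide
  have s12 : PySem.Str.startswith ".ato" "." = true := by decide
  simp only [s1, s2, s3, s4, s5, s6, s7, s8, s9, s10, s11, s12, if_true, if_false,
    Bool.false_eq_true, d1, d2, d3]
  rfl

-- per-name/minimum machinery for B
def minP (a b : Int × String) : Int × String := if b.1 < a.1 then b else a

def chainS (b0 b1 b2a b2b b2c b3a b3b b3c b3d b4 b5 bext : Bool) : Int × String :=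
  if b0 then (0, "xmake")
  else if b1 then (1, "cmake")
  else if b2a then (2, "node") else if b2b then (2, "node") else if b2c then (2, "node")
  else if b3a then (3, "python") else if b3b then (3, "python") else if b3c then (3, "python") else if b3d then (3, "python")
  else if b4 then (4, "rust")
  else if b5 then (5, "go")
  else if bext then (6, "dsl")
  else (7, "unknown")

def chainOf (names : List String) : Int × String :=
  chainS (ql names "xmake.lua") (ql names "cmakelists.txt") (ql names "package.json")
    (ql names "pnpm-lock.yaml") (ql names "bun.lockb") (ql names "pyproject.toml")
    (ql names "uv.lock") (ql names "requirements.txt") (ql names "pipfile")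
    (ql names "cargo.toml") (ql names "go.mod") (qext names)

def singleS (name : String) : Int × String :=
  chainS (PySem.Str.lower name == "xmake.lua")
    (PySem.Str.lower name == "cmakelists.txt") (PySem.Str.lower name == "package.json")
    (PySem.Str.lower name == "pnpm-lock.yaml") (PySem.Str.lower name == "bun.lockb")
    (PySem.Str.lower name == "pyproject.toml") (PySem.Str.lower name == "uv.lock")
    (PySem.Str.lower name == "requirements.txt") (PySem.Str.lower name == "pipfile")
    (PySem.Str.lower name == "cargo.toml") (PySem.Str.lower name == "go.mod")
    (PySem.Str.endswith (PySem.Str.lower name) ".ato")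

theorem bStep_eq (best : Int × String) (name : String) (hb : best.1 ≤ 7) :
    bStep best name = minP best (singleS name) := by
  by_cases h0 : PySem.Str.lower name = "xmake.lua"
  · simp [bStep, minP, singleS, chainS, h0, PySem.Dict.get?, bExact, List.find?]
    exact fun hc _ => absurd hc (by decide)
  by_cases h1 : PySem.Str.lower name = "cmakelists.txt"
  · simp [bStep, minP, singleS, chainS, h0, h1, PySem.Dict.get?, bExact, List.find?]
    exact fun hc _ => absurd hc (by decide)
  by_cases h2 : PySem.Str.lower name = "package.json"
  · simp [bStep, minP, singleS, chainS, h0, h1, h2, PySem.Dict.get?, bExact, List.find?]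
    exact fun hc _ => absurd hc (by decide)
  by_cases h3 : PySem.Str.lower name = "pnpm-lock.yaml"
  · simp [bStep, minP, singleS, chainS, h0, h1, h2, h3, PySem.Dict.get?, bExact, List.find?]
    exact fun hc _ => absurd hc (by decide)
  by_cases h4 : PySem.Str.lower name = "bun.lockb"
  · simp [bStep, minP, singleS, chainS, h0, h1, h2, h3, h4, PySem.Dict.get?, bExact, List.find?]
    exact fun hc _ => absurd hc (by decide)
  by_cases h5 : PySem.Str.lower name = "pyproject.toml"
  · simp [bStep, minP, singleS, chainS, h0, h1, h2, h3, h4, h5, PySem.Dict.get?, bExact, List.find?]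
    exact fun hc _ => absurd hc (by decide)
  by_cases h6 : PySem.Str.lower name = "uv.lock"
  · simp [bStep, minP, singleS, chainS, h0, h1, h2, h3, h4, h5, h6, PySem.Dict.get?, bExact, List.find?]
    exact fun hc _ => absurd hc (by decide)
  by_cases h7 : PySem.Str.lower name = "requirements.txt"
  · simp [bStep, minP, singleS, chainS, h0, h1, h2, h3, h4, h5, h6, h7, PySem.Dict.get?, bExact, List.find?]
    exact fun hc _ => absurd hc (by decide)
  by_cases h8 : PySem.Str.lower name = "pipfile"
  · simp [bStep, minP, singleS, chainS, h0, h1, h2, h3, h4, h5, h6, h7, h8, PySem.Dict.get?, bExact, List.find?]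
    exact fun hc _ => absurd hc (by decide)
  by_cases h9 : PySem.Str.lower name = "cargo.toml"
  · simp [bStep, minP, singleS, chainS, h0, h1, h2, h3, h4, h5, h6, h7, h8, h9, PySem.Dict.get?, bExact, List.find?]
    exact fun hc _ => absurd hc (by decide)
  by_cases h10 : PySem.Str.lower name = "go.mod"
  · simp [bStep, minP, singleS, chainS, h0, h1, h2, h3, h4, h5, h6, h7, h8, h9, h10, PySem.Dict.get?, bExact, List.find?]
    exact fun hc _ => absurd hc (by decide)
  have e0 : (("xmake.lua" : String) == PySem.Str.lower name) = false := beq_eq_false_iff_ne.mpr (Ne.symm h0)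
  have f0 : ((PySem.Str.lower name == ("xmake.lua" : String))) = false := beq_eq_false_iff_ne.mpr h0
  have e1 : (("cmakelists.txt" : String) == PySem.Str.lower name) = false := beq_eq_false_iff_ne.mpr (Ne.symm h1)
  have f1 : ((PySem.Str.lower name == ("cmakelists.txt" : String))) = false := beq_eq_false_iff_ne.mpr h1
  have e2 : (("package.json" : String) == PySem.Str.lower name) = false := beq_eq_false_iff_ne.mpr (Ne.symm h2)
  have f2 : ((PySem.Str.lower name == ("package.json" : String))) = false := beq_eq_false_iff_ne.mpr h2
  have e3 : (("pnpm-lock.yaml" : String) == PySem.Str.lower name) = false := beq_eq_false_iff_ne.mpr (Ne.symm h3)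
  have f3 : ((PySem.Str.lower name == ("pnpm-lock.yaml" : String))) = false := beq_eq_false_iff_ne.mpr h3
  have e4 : (("bun.lockb" : String) == PySem.Str.lower name) = false := beq_eq_false_iff_ne.mpr (Ne.symm h4)
  have f4 : ((PySem.Str.lower name == ("bun.lockb" : String))) = false := beq_eq_false_iff_ne.mpr h4
  have e5 : (("pyproject.toml" : String) == PySem.Str.lower name) = false := beq_eq_false_iff_ne.mpr (Ne.symm h5)
  have f5 : ((PySem.Str.lower name == ("pyproject.toml" : String))) = false := beq_eq_false_iff_ne.mpr h5
  have e6 : (("uv.lock" : String) == PySem.Str.lower name) = false := beq_eq_false_iff_ne.mpr (Ne.symm h6)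
  have f6 : ((PySem.Str.lower name == ("uv.lock" : String))) = false := beq_eq_false_iff_ne.mpr h6
  have e7 : (("requirements.txt" : String) == PySem.Str.lower name) = false := beq_eq_false_iff_ne.mpr (Ne.symm h7)
  have f7 : ((PySem.Str.lower name == ("requirements.txt" : String))) = false := beq_eq_false_iff_ne.mpr h7
  have e8 : (("pipfile" : String) == PySem.Str.lower name) = false := beq_eq_false_iff_ne.mpr (Ne.symm h8)
  have f8 : ((PySem.Str.lower name == ("pipfile" : String))) = false := beq_eq_false_iff_ne.mpr h8
  have e9 : (("cargo.toml" : String) == PySem.Str.lower name) = false := beq_eq_false_iff_ne.mpr (Ne.symm h9)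
  have f9 : ((PySem.Str.lower name == ("cargo.toml" : String))) = false := beq_eq_false_iff_ne.mpr h9
  have e10 : (("go.mod" : String) == PySem.Str.lower name) = false := beq_eq_false_iff_ne.mpr (Ne.symm h10)
  have f10 : ((PySem.Str.lower name == ("go.mod" : String))) = false := beq_eq_false_iff_ne.mpr h10
  have hget : PySem.Dict.get? bExact (PySem.Str.lower name) = none := by
    simp [PySem.Dict.get?, bExact, List.find?, e0, e1, e2, e3, e4, e5, e6, e7, e8, e9, e10]
  by_cases hext : PySem.Str.endswith (PySem.Str.lower name) ".ato" = true
  · have hext' : PySem.Chars.endswith (PySem.Chars.lower name.toList) ['.', 'a', 't', 'o'] = true := by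
      simpa using hext
    simp [bStep, minP, singleS, chainS, hget, f0, f1, f2, f3, f4, f5, f6, f7, f8, f9, f10, hext, hext']
  · have hext' : ¬ PySem.Chars.endswith (PySem.Chars.lower name.toList) ['.', 'a', 't', 'o'] = true := by
      simpa using hext
    have h7' : ¬ ((7 : Int) < best.1) := by omega
    simp [bStep, minP, singleS, chainS, hget, f0, f1, f2, f3, f4, f5, f6, f7, f8, f9, f10, hext, hext', h7']

theorem chainS_fst_le (b0 b1 b2a b2b b2c b3a b3b b3c b3d b4 b5 bext : Bool) :
    (chainS b0 b1 b2a b2b b2c b3a b3b b3c b3d b4 b5 bext).1 ≤ 7 := by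
  unfold chainS; split_ifs <;> norm_num

theorem minP_fst_le (a b : Int × String) (ha : a.1 ≤ 7) (hb : b.1 ≤ 7) : (minP a b).1 ≤ 7 := by
  unfold minP; split_ifs <;> assumption

theorem minP_assoc (a b c : Int × String) : minP (minP a b) c = minP a (minP b c) := by
  unfold minP; split_ifs <;> first | rfl | omega

-- a priority chain as a recursive scan, to merge two chains over the same payload table
def chainL : List (Bool × Int × String) → Int × String
  | [] => ((7 : Int), "unknown")
  | (b, i, s) :: r => if b then (i, s) else chainL r

abbrev RP (p q : Int × String) : Prop := p.1 ≤ q.1 ∧ (p.1 = q.1 → p.2 = q.2)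

theorem chainL_cases : ∀ (M : List (Bool × Int × String)),
    chainL M = ((7 : Int), "unknown") ∨ ∃ e ∈ M, chainL M = e.2
  | [] => Or.inl rfl
  | (b, i, s) :: r => by
    by_cases hbt : b = true
    · exact Or.inr ⟨(b, i, s), List.mem_cons_self .., by simp [chainL, hbt]⟩
    · rcases chainL_cases r with h | ⟨e, he, h⟩
      · left; simp [chainL, hbt, h]
      · right; exact ⟨e, List.mem_cons_of_mem _ he, by simp [chainL, hbt, h]⟩

theorem minP_chainL : ∀ (L : List ((Bool × Bool) × Int × String)),
    List.Pairwise RP (L.map (fun x => x.2) ++ [((7 : Int), "unknown")]) →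
    minP (chainL (L.map fun x => (x.1.1, x.2))) (chainL (L.map fun x => (x.1.2, x.2)))
      = chainL (L.map fun x => (x.1.1 || x.1.2, x.2))
  | [], _ => by simp [chainL, minP]
  | ⟨⟨b, c⟩, p⟩ :: r, h => by
    rw [List.map_cons, List.cons_append, List.pairwise_cons] at h
    obtain ⟨hhead, htail⟩ := h
    have hall : ∀ X, X = ((7 : Int), "unknown") ∨ (∃ e ∈ r, X = e.2) → RP p X := by
      rintro X (rfl | ⟨e, he, rfl⟩)
      · exact hhead _ (List.mem_append_right _ (List.mem_singleton.mpr rfl))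
      · exact hhead _ (List.mem_append_left _ (List.mem_map.mpr ⟨e, he, rfl⟩))
    have hXb : RP p (chainL (r.map fun x => (x.1.1, x.2))) := by
      apply hall
      rcases chainL_cases (r.map fun x => (x.1.1, x.2)) with hE | ⟨e, he, hE⟩
      · exact Or.inl hE
      · rcases List.mem_map.mp he with ⟨x, hx, rfl⟩
        exact Or.inr ⟨x, hx, hE⟩
    have hXc : RP p (chainL (r.map fun x => (x.1.2, x.2))) := by
      apply hall
      rcases chainL_cases (r.map fun x => (x.1.2, x.2)) with hE | ⟨e, he, hE⟩
      · exact Or.inl hE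
      · rcases List.mem_map.mp he with ⟨x, hx, rfl⟩
        exact Or.inr ⟨x, hx, hE⟩
    cases b <;> cases c <;>
      simp only [List.map_cons, chainL, Bool.false_or, Bool.true_or, Bool.or_self,
        if_true, if_false, Bool.false_eq_true, ↓reduceIte]
    · exact minP_chainL r htail
    · -- b = false, c = true : minP (chainL …) p = p
      unfold minP
      by_cases hlt : p.1 < (chainL (r.map fun x => (x.1.1, x.2))).1
      · rw [if_pos hlt]
      · rw [if_neg hlt]
        have h1 : (chainL (r.map fun x => (x.1.1, x.2))).1 = p.1 := by
          have := hXb.1; omega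
        have h2 : (chainL (r.map fun x => (x.1.1, x.2))).2 = p.2 := (hXb.2 h1.symm).symm
        exact Prod.ext h1 h2
    · -- b = true, c = false : minP p (chainL …) = p
      unfold minP
      rw [if_neg (by have := hXc.1; omega)]
    · simp [minP]

theorem ql_cons (n : String) (t : List String) (m : String) :
    ql (n :: t) m = ((PySem.Str.lower n == m) || ql t m) := by
  simp [ql]

theorem qext_cons (n : String) (t : List String) :
    qext (n :: t) = (PySem.Str.endswith (PySem.Str.lower n) ".ato" || qext t) := by
  simp [qext]

theorem chainOf_cons (n : String) (t : List String) :
    chainOf (n :: t) = minP (singleS n) (chainOf t) := by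
  have hp : List.Pairwise RP
      ([((0 : Int), "xmake"), ((1 : Int), "cmake"), ((2 : Int), "node"), ((2 : Int), "node"),
        ((2 : Int), "node"), ((3 : Int), "python"), ((3 : Int), "python"), ((3 : Int), "python"),
        ((3 : Int), "python"), ((4 : Int), "rust"), ((5 : Int), "go"), ((6 : Int), "dsl")]
        ++ [((7 : Int), "unknown")]) := by decide
  have h := minP_chainL
    [((PySem.Str.lower n == "xmake.lua", ql t "xmake.lua"), ((0 : Int), "xmake")),
     ((PySem.Str.lower n == "cmakelists.txt", ql t "cmakelists.txt"), ((1 : Int), "cmake")),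
     ((PySem.Str.lower n == "package.json", ql t "package.json"), ((2 : Int), "node")),
     ((PySem.Str.lower n == "pnpm-lock.yaml", ql t "pnpm-lock.yaml"), ((2 : Int), "node")),
     ((PySem.Str.lower n == "bun.lockb", ql t "bun.lockb"), ((2 : Int), "node")),
     ((PySem.Str.lower n == "pyproject.toml", ql t "pyproject.toml"), ((3 : Int), "python")),
     ((PySem.Str.lower n == "uv.lock", ql t "uv.lock"), ((3 : Int), "python")),
     ((PySem.Str.lower n == "requirements.txt", ql t "requirements.txt"), ((3 : Int), "python")),
     ((PySem.Str.lower n == "pipfile", ql t "pipfile"), ((3 : Int), "python")),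
     ((PySem.Str.lower n == "cargo.toml", ql t "cargo.toml"), ((4 : Int), "rust")),
     ((PySem.Str.lower n == "go.mod", ql t "go.mod"), ((5 : Int), "go")),
     ((PySem.Str.endswith (PySem.Str.lower n) ".ato", qext t), ((6 : Int), "dsl"))] hp
  rw [chainOf, ql_cons, ql_cons, ql_cons, ql_cons, ql_cons, ql_cons, ql_cons, ql_cons, ql_cons,
    ql_cons, ql_cons, qext_cons]
  exact h.symm

theorem fold_eq (names : List String) : ∀ (best : Int × String), best.1 ≤ 7 →
    names.foldl bStep best = minP best (chainOf names) := by
  induction names with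
  | nil =>
    intro best hb
    have hn : ¬ ((7 : Int) < best.1) := by omega
    simp [chainOf, chainS, minP, ql, qext, hn]
  | cons n t ih =>
    intro best hb
    rw [List.foldl_cons, bStep_eq best n hb,
      ih _ (minP_fst_le best (singleS n) hb (chainS_fst_le ..)), chainOf_cons, minP_assoc]

theorem chainOf_fst_le (names : List String) : (chainOf names).1 ≤ 7 := by
  rw [chainOf]; exact chainS_fst_le ..

theorem chainOf_top (names : List String) (h : (chainOf names).1 = 7) :
    chainOf names = ((7 : Int), "unknown") := by
  rw [chainOf] at h ⊢
  unfold chainS at h ⊢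
  split_ifs at h ⊢ <;> simp_all

theorem B_eq (names : List String) : classify_stack_py_alt names = (chainOf names).2 := by
  rw [classify_stack_py_alt, fold_eq names ((7 : Int), "unknown") (by norm_num)]
  by_cases h : (chainOf names).1 = 7
  · rw [minP, if_neg (by simp; omega), chainOf_top names h]
  · have hlt : (chainOf names).1 < 7 := lt_of_le_of_ne (chainOf_fst_le names) h
    rw [minP, if_pos (by simpa using hlt)]

-- ===== VERDICT (by name: the statement is the Claim_ definition above) =====
theorem classify_stack_py_spec : Claim_unchanged_classify_stack_py := by
  intro names _ hnd
  show classify_stack_py names = classify_stack_py_alt names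
  rw [A_eq, B_eq, chainOf]
  by_cases h0 : ql names "xmake.lua" = true
  · simp [chainS, h0]
  have hnx : "xmake.lua" ∉ names.map PySem.Str.lower := fun hx => h0 ((ql_mem names _).mp hx)
  by_cases h1 : ql names "cmakelists.txt" = true
  · exact absurd ⟨hnx, Or.inl ((ql_mem names _).mpr h1)⟩ hnd
  by_cases h2 : ql names "package.json" = true
  · simp [chainS, h0, h1, h2]
  by_cases h3 : ql names "pnpm-lock.yaml" = true
  · simp [chainS, h0, h1, h2, h3]
  by_cases h4 : ql names "bun.lockb" = true
  · simp [chainS, h0, h1, h2, h3, h4]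
  by_cases h5 : ql names "pyproject.toml" = true
  · simp [chainS, h0, h1, h2, h3, h4, h5]
  by_cases h6 : ql names "uv.lock" = true
  · simp [chainS, h0, h1, h2, h3, h4, h5, h6]
  by_cases h7 : ql names "requirements.txt" = true
  · simp [chainS, h0, h1, h2, h3, h4, h5, h6, h7]
  have hsix : ∀ m ∈ (["package.json", "pnpm-lock.yaml", "bun.lockb",
      "pyproject.toml", "uv.lock", "requirements.txt"] : List String),
      m ∉ names.map PySem.Str.lower := by
    intro m hm hx
    have hq := (ql_mem names m).mp hx
    fin_cases hm <;> simp_all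
  by_cases h8 : ql names "pipfile" = true
  · exact absurd ⟨hnx, Or.inr ⟨hsix, Or.inl ((ql_mem names _).mpr h8)⟩⟩ hnd
  by_cases h9 : ql names "cargo.toml" = true
  · exact absurd ⟨hnx, Or.inr ⟨hsix, Or.inr ((ql_mem names _).mpr h9)⟩⟩ hnd
  by_cases h10 : ql names "go.mod" = true
  · simp [chainS, h0, h1, h2, h3, h4, h5, h6, h7, h8, h9, h10]
  by_cases hext : qext names = true
  · simp [chainS, h0, h1, h2, h3, h4, h5, h6, h7, h8, h9, h10, hext]
  · simp [chainS, h0, h1, h2, h3, h4, h5, h6, h7, h8, h9, h10, hext]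

set_option maxHeartbeats 1000000 in
theorem classify_stack_py_changed : Claim_changed_classify_stack_py := by
  unfold Claim_changed_classify_stack_py
  refine ⟨by decide, by decide, by decide, by decide, by decide⟩

theorem classify_stack_py_tight : Claim_exact_classify_stack_py := by
  intro names _ hd
  rw [A_eq, B_eq, chainOf]
  unfold D_classify_stack_py at hd
  obtain ⟨hd0, hd1⟩ := hd
  have h0 : ql names "xmake.lua" = false := not_mem_ql names _ hd0
  rcases hd1 with h1 | ⟨hall, hrest⟩
  · have h1' : ql names "cmakelists.txt" = true := (ql_mem names _).mp h1
    simp only [chainS, h0, h1', Bool.false_eq_true, if_false, if_true]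
    split_ifs <;> decide
  · have q1 : ql names "package.json" = false := not_mem_ql names _ (hall _ (by simp))
    have q2 : ql names "pnpm-lock.yaml" = false := not_mem_ql names _ (hall _ (by simp))
    have q3 : ql names "bun.lockb" = false := not_mem_ql names _ (hall _ (by simp))
    have q4 : ql names "pyproject.toml" = false := not_mem_ql names _ (hall _ (by simp))
    have q5 : ql names "uv.lock" = false := not_mem_ql names _ (hall _ (by simp))
    have q6 : ql names "requirements.txt" = false := not_mem_ql names _ (hall _ (by simp))
    rcases hrest with h8 | h9
    · have h8' : ql names "pipfile" = true := (ql_mem names _).mp h8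
      simp only [chainS, h0, q1, q2, q3, q4, q5, q6, h8', Bool.false_eq_true, if_false, if_true]
      split_ifs <;> decide
    · have h9' : ql names "cargo.toml" = true := (ql_mem names _).mp h9
      simp only [chainS, h0, q1, q2, q3, q4, q5, q6, h9', Bool.false_eq_true, if_false, if_true]
      split_ifs <;> decide
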